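-- pv_equiv track=rewrite | github.com/Infrapink/calconv | hipparchic.py | nyd
-- ===== SOURCE A (Python) =====
-- epoch = 1601069
--
-- year_lengths = {0:  354,
--                 1:  355,
--                 2:  384,
--                 3:  354,
--                 4:  384,
--                 5:  354,
--                 6:  355,
--                 7:  384,
--                 8:  354,
--                 9:  355,
--                 10: 384,
--                 11: 354,
--                 12: 384,
--                 13: 354,
--                 14: 355,
--                 15: 384,
--                 16: 354,
--                 17: 354,
--                 18: 384}
--
-- def daysin(year):
--     '''Return number of days in a given year'''
--     year = int(year)
--     if (year > 0):
--         year -= 1 # ancient Greeks did not recognise the number 0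
--
--     if ((year % 76 == 74) or (year % 304 == 291)):
--         ans = 354
--     else:
--         ans = year_lengths[year % 19]
--     return ans
--
-- def nyd(year):
--     '''Compute the Julian Day on which New Year's Day falls'''
--     year = int(year)
--     if (year > 0):
--         year -= 1 # ancient Greeks did not recognise the number 0
--
--     y = 304 * (year // 304)
--     noumenia = epoch + (111035 * (year // 304))
--
--     while (y + 76 <= year):
--         y += 76
--         noumenia += 27759
--     while ((y + 19 <= year) and (y % 304 < 291)):
--         y += 19
--         noumenia += 6940
--     while (y < year):
--         if (y < 0):
--             noumenia += daysin(y)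
--             y += 1
--         else:
--             y += 1
--             noumenia += daysin(y)
--     return noumenia
-- ===== SOURCE B (Python) =====
-- epoch = 1601069
--
-- year_lengths = {0:  354,
--                 1:  355,
--                 2:  384,
--                 3:  354,
--                 4:  384,
--                 5:  354,
--                 6:  355,
--                 7:  384,
--                 8:  354,
--                 9:  355,
--                 10: 384,
--                 11: 354,
--                 12: 384,
--                 13: 354,
--                 14: 355,
--                 15: 384,
--                 16: 354,
--                 17: 354,
--                 18: 384}
--
-- def nyd(year):
--     '''Compute the Julian Day on which New Year's Day falls'''
--     year = int(year)
--     if year > 0: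
--         year -= 1  # ancient Greeks did not recognise the number 0
--
--     # Closed form: split the (adjusted) year into whole 304-year eras,
--     # whole 76-year cycles, whole 19-year cycles, and the leftover years.
--     q, r = divmod(year, 304)
--     k1, r = divmod(r, 76)
--     k2, m = divmod(r, 19)
--     jd = epoch + 111035 * q + 27759 * k1 + 6940 * k2
--     s = 76 * k1 + 19 * k2
--     for t in range(s, s + m):   # at most 18 leftover years within the era
--         jd += 354 if (t % 76 == 74 or t == 291) else year_lengths[t % 19]
--     return jd
-- ===== Notes on version B (the rewrite author's own statement) =====
-- stated objective: simpler
-- what changed: Replaces the three cascaded while-loops that jump y in 76-, 19- and 1-year tiers (calling daysin with sign-aware ordering) with a direct closed form: three divmods compute the era/cycle counts, the totals are obtained by multiplication, and only the at most 18 leftover years inside one 19-year cycle are summed by a single bounded for-loop over canonical era offsets.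
import Mathlib
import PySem

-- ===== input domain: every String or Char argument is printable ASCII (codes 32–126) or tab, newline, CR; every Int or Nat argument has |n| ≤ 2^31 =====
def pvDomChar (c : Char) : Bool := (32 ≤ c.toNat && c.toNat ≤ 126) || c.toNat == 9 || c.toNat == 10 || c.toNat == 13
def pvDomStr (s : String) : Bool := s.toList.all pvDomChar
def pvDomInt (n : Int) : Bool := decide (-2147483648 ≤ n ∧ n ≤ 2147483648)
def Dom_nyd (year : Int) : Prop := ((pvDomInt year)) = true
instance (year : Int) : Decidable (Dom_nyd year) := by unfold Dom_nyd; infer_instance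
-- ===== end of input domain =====

-- B replaces A's three cascaded while-loops by a closed form (three divmods plus a bounded
-- leftover sum) for simplicity; equivalence of the return values is proved below.

-- ===== PORT A =====
def pvEpoch : Int := 1601069

def pvYearLengths : PySem.Dict Int Int :=
  PySem.Dict.ofList [(0, 354), (1, 355), (2, 384), (3, 354), (4, 384), (5, 354), (6, 355),
    (7, 384), (8, 354), (9, 355), (10, 384), (11, 354), (12, 384), (13, 354), (14, 355),
    (15, 384), (16, 354), (17, 354), (18, 384)]

-- year_lengths[year % 19]: the key year % 19 lies in [0, 19), so it is always present and
-- the KeyError branch is unreachable; .getD 0 is therefore exact.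
def daysin (year : Int) : Int :=
  let year := if year > 0 then year - 1 else year
  if PySem.Int.mod year 76 = 74 ∨ PySem.Int.mod year 304 = 291 then 354
  else (PySem.Dict.get? pvYearLengths (PySem.Int.mod year 19)).getD 0

-- while (y + 76 <= year): y += 76; noumenia += 27759
def nydLoop76 (year y noumenia : Int) : Int × Int :=
  if h : y + 76 ≤ year then nydLoop76 year (y + 76) (noumenia + 27759) else (y, noumenia)
termination_by (year - y).toNat
decreasing_by omega

-- while (y + 19 <= year and y % 304 < 291): y += 19; noumenia += 6940
def nydLoop19 (year y noumenia : Int) : Int × Int :=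
  if h : y + 19 ≤ year ∧ PySem.Int.mod y 304 < 291 then
    nydLoop19 year (y + 19) (noumenia + 6940)
  else (y, noumenia)
termination_by (year - y).toNat
decreasing_by omega

-- while (y < year): if y < 0: noumenia += daysin(y); y += 1 else: y += 1; noumenia += daysin(y)
def nydLoop1 (year y noumenia : Int) : Int :=
  if _h : y < year then
    if y < 0 then nydLoop1 year (y + 1) (noumenia + daysin y)
    else nydLoop1 year (y + 1) (noumenia + daysin (y + 1))
  else noumenia
termination_by (year - y).toNat
decreasing_by all_goals omega

def nyd (year : Int) : Int :=
  let year := if year > 0 then year - 1 else year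
  let q := PySem.Int.floordiv year 304
  let y := 304 * q
  let noumenia := pvEpoch + 111035 * q
  let p1 := nydLoop76 year y noumenia
  let p2 := nydLoop19 year p1.1 p1.2
  nydLoop1 year p2.1 p2.2

-- ===== PORT B =====
-- length of era-offset year t (0 ≤ t < 304); year_lengths key t % 19 ∈ [0,19) always present
def pvLenOf (t : Int) : Int :=
  if PySem.Int.mod t 76 = 74 ∨ t = 291 then 354
  else (PySem.Dict.get? pvYearLengths (PySem.Int.mod t 19)).getD 0

def nyd_alt (year : Int) : Int :=
  let year := if year > 0 then year - 1 else year
  let q := PySem.Int.floordiv year 304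
  let r := PySem.Int.mod year 304
  let k1 := PySem.Int.floordiv r 76
  let r1 := PySem.Int.mod r 76
  let k2 := PySem.Int.floordiv r1 19
  let m := PySem.Int.mod r1 19
  let jd := pvEpoch + 111035 * q + 27759 * k1 + 6940 * k2
  let s := 76 * k1 + 19 * k2
  (PySem.List.pyRange s (s + m) 1).foldl (fun jd t => jd + pvLenOf t) jd

-- ===== PRECONDITION & SPEC =====
def Spec_nyd (year : Int) (out : Int) : Prop := out = nyd_alt year
instance (year : Int) (out : Int) : Decidable (Spec_nyd year out) := by unfold Spec_nyd; infer_instance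

-- ===== CLAIM (what is proved, stated in full; the proofs are below) =====
def Claim_equal_nyd : Prop := ∀ (year : Int), Dom_nyd year → Spec_nyd year (nyd year)

-- ===== LEMMAS AND PROOFS =====

-- daysin's body after the "no year zero" adjustment has been undone
def pvFd (y : Int) : Int :=
  if PySem.Int.mod y 76 = 74 ∨ PySem.Int.mod y 304 = 291 then 354
  else (PySem.Dict.get? pvYearLengths (PySem.Int.mod y 19)).getD 0

theorem daysin_of_nonpos (y : Int) (h : y ≤ 0) : daysin y = pvFd y := by
  simp only [daysin, pvFd]
  rw [if_neg (by omega : ¬ y > 0)]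

theorem daysin_succ_of_nonneg (y : Int) (h : 0 ≤ y) : daysin (y + 1) = pvFd y := by
  simp only [daysin, pvFd]
  rw [if_pos (by omega : y + 1 > 0)]
  norm_num

-- sum of pvFd over [304*q + t, 304*q + t + k)
def pvDs (q t : Int) : Nat → Int
  | 0 => 0
  | k + 1 => pvFd (304 * q + t) + pvDs q (t + 1) k

-- sum of pvLenOf over [t, t + k)
def pvBs (t : Int) : Nat → Int
  | 0 => 0
  | k + 1 => pvLenOf t + pvBs (t + 1) k

theorem mod_eq_self_304 (q s : Int) (h0 : 0 ≤ s) (h1 : s < 304) :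
    PySem.Int.mod (304 * q + s) 304 = s := by
  rw [PySem.Int.mod_eq_emod_of_pos (by norm_num : (0:Int) < 304)]
  omega

theorem loop1_sum (k : Nat) : ∀ (q t n : Int),
    nydLoop1 (304 * q + t + k) (304 * q + t) n = n + pvDs q t k := by
  induction k with
  | zero =>
    intro q t n
    rw [nydLoop1]
    simp [pvDs]
  | succ k ih =>
    intro q t n
    rw [nydLoop1]
    push_cast
    rw [dif_pos (by omega : 304 * q + t < 304 * q + t + ((k : Int) + 1))]
    have harg : (304 * q + t + ((k : Int) + 1)) = 304 * q + (t + 1) + (k : Int) := by ring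
    by_cases hneg : 304 * q + t < 0
    · rw [if_pos hneg, daysin_of_nonpos _ (by omega)]
      rw [harg, show (304 * q + t + 1 : Int) = 304 * q + (t + 1) from by ring]
      rw [ih q (t + 1) (n + pvFd (304 * q + t))]
      simp only [pvDs]; omega
    · rw [if_neg hneg, daysin_succ_of_nonneg _ (by omega)]
      rw [harg, show (304 * q + t + 1 : Int) = 304 * q + (t + 1) from by ring]
      rw [ih q (t + 1) (n + pvFd (304 * q + t))]
      simp only [pvDs]; omega

theorem loop19_sum (j : Nat) : ∀ (q s k n : Int), 0 ≤ s → 0 ≤ k → s + k < 304 →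
    k < 19 * (j : Int) + 19 →
    (fun p => nydLoop1 (304 * q + s + k) p.1 p.2) (nydLoop19 (304 * q + s + k) (304 * q + s) n)
      = n + 6940 * (k / 19) + pvDs q (s + 19 * (k / 19)) (k % 19).toNat := by
  induction j with
  | zero =>
    intro q s k n hs hk hlt hj
    have hk19 : k < 19 := by omega
    have hguard : ¬ (304 * q + s + 19 ≤ 304 * q + s + k ∧ PySem.Int.mod (304 * q + s) 304 < 291) := by
      rintro ⟨h1, -⟩; omega
    rw [nydLoop19, dif_neg hguard]
    simp only
    have hkk : k = ((k.toNat : Int)) := by omega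
    rw [hkk, loop1_sum k.toNat q s n]
    have h1 : (k.toNat : Int) / 19 = 0 := by omega
    have h2 : (k.toNat : Int) % 19 = (k.toNat : Int) := by omega
    rw [h1, h2]
    simp only [mul_zero, add_zero, Int.toNat_natCast]
  | succ j ih =>
    intro q s k n hs hk hlt hj
    by_cases hstep : 19 ≤ k
    · have hmod : PySem.Int.mod (304 * q + s) 304 = s := mod_eq_self_304 q s hs (by omega)
      rw [nydLoop19, dif_pos (by refine ⟨by omega, ?_⟩; rw [hmod]; omega)]
      have harg : (304 * q + s + k) = 304 * q + (s + 19) + (k - 19) := by ring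
      rw [harg, show (304 * q + s + 19 : Int) = 304 * q + (s + 19) from by ring]
      rw [ih q (s + 19) (k - 19) (n + 6940) (by omega) (by omega) (by omega) (by omega)]
      have e1 : (k - 19) / 19 = k / 19 - 1 := by omega
      have e2 : (k - 19) % 19 = k % 19 := by omega
      have e3 : s + 19 + 19 * (k / 19 - 1) = s + 19 * (k / 19) := by ring
      rw [e1, e2, e3]
      ring
    · have hguard : ¬ (304 * q + s + 19 ≤ 304 * q + s + k ∧ PySem.Int.mod (304 * q + s) 304 < 291) := by
        rintro ⟨h1, -⟩; omega
      rw [nydLoop19, dif_neg hguard]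
      simp only
      have hkk : k = ((k.toNat : Int)) := by omega
      rw [hkk, loop1_sum k.toNat q s n]
      have h1 : (k.toNat : Int) / 19 = 0 := by omega
      have h2 : (k.toNat : Int) % 19 = (k.toNat : Int) := by omega
      rw [h1, h2]
      simp only [mul_zero, add_zero, Int.toNat_natCast]

theorem loop76_sum (j : Nat) : ∀ (q s k n : Int), 0 ≤ s → 0 ≤ k → s + k < 304 →
    k < 76 * (j : Int) + 76 →
    (fun p => nydLoop1 (304 * q + s + k) (nydLoop19 (304 * q + s + k) p.1 p.2).1
        (nydLoop19 (304 * q + s + k) p.1 p.2).2)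
      (nydLoop76 (304 * q + s + k) (304 * q + s) n)
      = n + 27759 * (k / 76) + 6940 * ((k % 76) / 19)
          + pvDs q (s + 76 * (k / 76) + 19 * ((k % 76) / 19)) ((k % 76) % 19).toNat := by
  induction j with
  | zero =>
    intro q s k n hs hk hlt hj
    have hk76 : k < 76 := by omega
    rw [nydLoop76, dif_neg (by omega : ¬ 304 * q + s + 76 ≤ 304 * q + s + k)]
    have := loop19_sum 3 q s k n hs hk hlt (by push_cast; omega)
    simp only at this ⊢
    rw [this]
    have h1 : k / 76 = 0 := by omega
    have h2 : k % 76 = k := by omega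
    rw [h1, h2, show (s + 76 * (0:Int) + 19 * (k / 19)) = s + 19 * (k / 19) from by ring]
    ring
  | succ j ih =>
    intro q s k n hs hk hlt hj
    by_cases hstep : 76 ≤ k
    · rw [nydLoop76, dif_pos (by omega : 304 * q + s + 76 ≤ 304 * q + s + k)]
      have harg : (304 * q + s + k) = 304 * q + (s + 76) + (k - 76) := by ring
      rw [harg, show (304 * q + s + 76 : Int) = 304 * q + (s + 76) from by ring]
      rw [ih q (s + 76) (k - 76) (n + 27759) (by omega) (by omega) (by omega) (by omega)]
      have e1 : (k - 76) / 76 = k / 76 - 1 := by omega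
      have e2 : (k - 76) % 76 = k % 76 := by omega
      have e3 : s + 76 + 76 * (k / 76 - 1) = s + 76 * (k / 76) := by ring
      rw [e1, e2, e3]
      ring
    · rw [nydLoop76, dif_neg (by omega : ¬ 304 * q + s + 76 ≤ 304 * q + s + k)]
      have := loop19_sum 3 q s k n hs hk hlt (by push_cast; omega)
      simp only at this ⊢
      rw [this]
      have h1 : k / 76 = 0 := by omega
      have h2 : k % 76 = k := by omega
      rw [h1, h2, show (s + 76 * (0:Int) + 19 * (k / 19)) = s + 19 * (k / 19) from by ring]
      ring

theorem pvFd_eq_pvLenOf (q t : Int) (h0 : 0 ≤ t) (h1 : t < 304) :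
    pvFd (304 * q + t) = pvLenOf t := by
  simp only [pvFd, pvLenOf]
  simp only [PySem.Int.mod_eq_emod_of_pos (by norm_num : (0:Int) < 76),
      PySem.Int.mod_eq_emod_of_pos (by norm_num : (0:Int) < 304),
      PySem.Int.mod_eq_emod_of_pos (by norm_num : (0:Int) < 19)]
  rw [show (304 * q + t) % 76 = t % 76 by omega,
      show (304 * q + t) % 19 = t % 19 by omega,
      show (304 * q + t) % 304 = t by omega]

theorem pvDs_eq_pvBs (k : Nat) : ∀ (q t : Int), 0 ≤ t → t + k ≤ 304 → pvDs q t k = pvBs t k := by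
  induction k with
  | zero => intro q t _ _; rfl
  | succ k ih =>
    intro q t h0 h1
    simp only [pvDs, pvBs]
    rw [pvFd_eq_pvLenOf q t h0 (by omega), ih q (t + 1) (by omega) (by push_cast at h1 ⊢; omega)]

theorem fold_eq_pvBs (k : Nat) : ∀ (s init : Int),
    (PySem.List.pyRange s (s + k) 1).foldl (fun jd t => jd + pvLenOf t) init = init + pvBs s k := by
  induction k with
  | zero =>
    intro s init
    rw [show s + ((0:Nat) : Int) = s by omega, PySem.List.pyRange_one_eq_nil (le_refl s)]
    simp [pvBs]
  | succ k ih =>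
    intro s init
    push_cast
    rw [PySem.List.pyRange_one_cons (by omega : s < s + ((k:Int) + 1))]
    simp only [List.foldl_cons]
    rw [show s + ((k:Int) + 1) = (s + 1) + (k : Int) by ring]
    rw [ih (s + 1) (init + pvLenOf s)]
    simp only [pvBs]; ring

-- ===== VERDICT (by name: the statement is the Claim_ definition above) =====
theorem nyd_spec : Claim_equal_nyd := by
  intro year _
  unfold Spec_nyd nyd nyd_alt
  simp only
  set Y := if year > 0 then year - 1 else year with hY
  set q := PySem.Int.floordiv Y 304 with hq
  set r := PySem.Int.mod Y 304 with hr
  have hqr : q * 304 + r = Y := PySem.Int.floordiv_mul_add_mod Y 304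
  have hr0 : 0 ≤ r := PySem.Int.mod_nonneg Y (by norm_num)
  have hr1 : r < 304 := PySem.Int.mod_lt Y (by norm_num)
  -- A side: Y = 304*q + 0 + r
  have hA := loop76_sum 3 q 0 r (pvEpoch + 111035 * q) (le_refl 0) hr0 (by omega) (by push_cast; omega)
  simp only at hA
  norm_num at hA
  rw [show Y = 304 * q + r from by omega]
  rw [hA]
  -- B side: rewrite the Python floordiv/mod on the nonnegative r into / and %
  simp only [PySem.Int.floordiv_eq_ediv_of_pos (by norm_num : (0:Int) < 76),
      PySem.Int.mod_eq_emod_of_pos (by norm_num : (0:Int) < 76),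
      PySem.Int.floordiv_eq_ediv_of_pos (by norm_num : (0:Int) < 19),
      PySem.Int.mod_eq_emod_of_pos (by norm_num : (0:Int) < 19)]
  rw [show (r % 76) % 19 = r % 19 from by omega]
  rw [show (r % 19 : Int) = ((r % 19).toNat : Int) from by omega]
  rw [fold_eq_pvBs (r % 19).toNat (76 * (r / 76) + 19 * ((r % 76) / 19)) _]
  simp only [Int.toNat_natCast]
  rw [pvDs_eq_pvBs (r % 19).toNat q (76 * (r / 76) + 19 * ((r % 76) / 19))
    (by omega) (by omega)]
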